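-- pv_equiv track=rewrite | github.com/hanukathas/CodingRevisions | revisions/array/diet_plan.py | diet_plan
-- ===== SOURCE A (Python) =====
-- def diet_plan(arr:list, size: int, upper: int, lower: int):
--     prefix = sum(arr[:size])
--     net = 0
--     if prefix < lower:
--         net -= 1
--     else:
--         net += 1
--
--
--     for i in range(size, len(arr)):
--         prefix = prefix + arr[i] - arr[i - size]
--         if prefix < lower:
--             net -= 1
--         else:
--             net += 1
--
--     return net
-- ===== SOURCE B (Python) =====
-- def diet_plan(arr: list, size: int, upper: int, lower: int):
--     # prefix-sum table: csum[k] = sum of the first k elements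
--     csum = [0]
--     for x in arr:
--         csum.append(csum[-1] + x)
--     n = len(arr)
--     net = 1 if csum[min(size, n)] >= lower else -1
--     for i in range(size, n):
--         s = csum[i + 1] - csum[i + 1 - size]
--         net += 1 if s >= lower else -1
--     return net
-- ===== Notes on version B (the rewrite author's own statement) =====
-- stated objective: alternative
-- what changed: B builds an explicit prefix-sum table once and computes every window sum by direct table lookups C[i+1]-C[i+1-size], instead of A's rolling update carrying the window sum via prefix + arr[i] - arr[i-size].
import Mathlib
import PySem

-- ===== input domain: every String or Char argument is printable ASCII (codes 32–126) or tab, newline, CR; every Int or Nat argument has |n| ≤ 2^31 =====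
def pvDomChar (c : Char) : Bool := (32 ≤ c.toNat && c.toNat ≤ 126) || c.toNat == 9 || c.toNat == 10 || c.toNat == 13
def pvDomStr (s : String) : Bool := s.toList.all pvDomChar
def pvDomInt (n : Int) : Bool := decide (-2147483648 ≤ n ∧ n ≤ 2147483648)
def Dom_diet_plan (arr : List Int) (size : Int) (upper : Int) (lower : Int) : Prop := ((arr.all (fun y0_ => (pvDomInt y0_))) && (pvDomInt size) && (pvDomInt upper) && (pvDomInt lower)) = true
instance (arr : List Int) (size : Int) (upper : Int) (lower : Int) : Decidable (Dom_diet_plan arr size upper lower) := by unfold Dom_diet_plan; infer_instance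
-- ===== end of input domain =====

-- B replaces A's rolling-window update (prefix + arr[i] - arr[i-size]) by a prefix-sum
-- table indexed directly (alternative decomposition, same O(n) cost; return value only).

-- ===== PORT A =====
def diet_plan (arr : List Int) (size : Int) (upper : Int) (lower : Int) : Int :=
  let prefix0 : Int := (PySem.List.slice arr none (some size)).sum
  let net0 : Int := if prefix0 < lower then (0 : Int) - 1 else (0 : Int) + 1
  let st := (PySem.List.pyRange size (arr.length : Int) 1).foldl
    (fun (st : Int × Int) i =>
      let p := st.1 + PySem.List.pyGetD arr i 0 - PySem.List.pyGetD arr (i - size) 0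
      (p, if p < lower then st.2 - 1 else st.2 + 1))
    (prefix0, net0)
  st.2

-- ===== PORT B =====
def diet_plan_alt (arr : List Int) (size : Int) (upper : Int) (lower : Int) : Int :=
  let csum : List Int := arr.foldl (fun c x => c ++ [PySem.List.pyGetD c (-1) 0 + x]) [(0 : Int)]
  let n : Int := (arr.length : Int)
  let net0 : Int := if PySem.List.pyGetD csum (min size n) 0 ≥ lower then 1 else -1
  (PySem.List.pyRange size n 1).foldl
    (fun net i =>
      let s := PySem.List.pyGetD csum (i + 1) 0 - PySem.List.pyGetD csum (i + 1 - size) 0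
      net + (if s ≥ lower then 1 else -1))
    net0

-- ===== PRECONDITION & SPEC =====
-- Pre_ excludes negative size, on which Python A always raises IndexError
-- (arr[i - size] eventually indexes past the end, or arr[i] on an empty list).
def Pre_diet_plan (arr : List Int) (size : Int) (upper : Int) (lower : Int) : Prop := 0 ≤ size
instance (arr : List Int) (size : Int) (upper : Int) (lower : Int) : Decidable (Pre_diet_plan arr size upper lower) := by unfold Pre_diet_plan; infer_instance
def pvWitness_diet_plan : List Int × Int × Int × Int := ([3, 1, 4, 1, 5], 2, 0, 5)

def Spec_diet_plan (arr : List Int) (size : Int) (upper : Int) (lower : Int) (out : Int) : Prop := out = diet_plan_alt arr size upper lower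
instance (arr : List Int) (size : Int) (upper : Int) (lower : Int) (out : Int) : Decidable (Spec_diet_plan arr size upper lower out) := by unfold Spec_diet_plan; infer_instance

-- ===== CLAIM (what is proved, stated in full; the proofs are below) =====
def Claim_equal_diet_plan : Prop := ∀ (arr : List Int) (size : Int) (upper : Int) (lower : Int), Dom_diet_plan arr size upper lower → Pre_diet_plan arr size upper lower → Spec_diet_plan arr size upper lower (diet_plan arr size upper lower)

-- ===== LEMMAS AND PROOFS =====

-- characterisation of B's prefix-sum table
lemma csum_spec (arr : List Int) :
    arr.foldl (fun c x => c ++ [PySem.List.pyGetD c (-1) 0 + x]) [(0 : Int)]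
      = (List.range (arr.length + 1)).map (fun k => (arr.take k).sum) := by
  induction arr using List.reverseRecOn with
  | nil => simp
  | append_singleton l x ih =>
    rw [List.foldl_append, List.foldl_cons, List.foldl_nil, ih]
    have hlast : PySem.List.pyGetD ((List.range (l.length + 1)).map
        (fun k => (l.take k).sum)) (-1) (0 : Int) = l.sum := by
      rw [List.range_succ, List.map_append]
      simp [PySem.List.pyGetD_neg_one_append_singleton]
    rw [hlast]
    have hcongr : (List.range (l.length + 1)).map (fun k => (l.take k).sum)
        = (List.range (l.length + 1)).map (fun k => ((l ++ [x]).take k).sum) := by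
      apply List.map_congr_left
      intro k hk
      have hk' : k ≤ l.length := Nat.lt_succ_iff.mp (List.mem_range.mp hk)
      simp [List.take_append, Nat.sub_eq_zero_of_le hk']
    have htake : (l ++ [x]).take (l.length + 1) = l ++ [x] :=
      List.take_of_length_le (by simp)
    have hR : (List.range ((l ++ [x]).length + 1)).map (fun k => ((l ++ [x]).take k).sum)
        = (List.range (l.length + 1)).map (fun k => (l.take k).sum) ++ [l.sum + x] := by
      rw [show (l ++ [x]).length + 1 = (l.length + 1) + 1 from by simp,
        List.range_succ, List.map_append, hcongr]
      simp [htake]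
    rw [hR]

-- reading the table: csum[k] is the sum of the first k elements
lemma csum_get (arr : List Int) (k : Int) (h0 : 0 ≤ k) (h1 : k ≤ (arr.length : Int)) :
    PySem.List.pyGetD
        (arr.foldl (fun c x => c ++ [PySem.List.pyGetD c (-1) 0 + x]) [(0 : Int)]) k 0
      = (arr.take k.toNat).sum := by
  rw [csum_spec]
  rw [PySem.List.pyGetD_eq_getElem _ 0 h0 (by simp; omega)]
  simp

-- the two loops agree: A carries the window sum, B recomputes it from the table
lemma loops_eq (arr : List Int) (size lower : Int) (hs : 0 ≤ size) :
    ∀ (t : Nat) (a net : Int), ((arr.length : Int) - a).toNat = t → size ≤ a →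
      ((PySem.List.pyRange a (arr.length : Int) 1).foldl
        (fun (st : Int × Int) i =>
          let p := st.1 + PySem.List.pyGetD arr i 0 - PySem.List.pyGetD arr (i - size) 0
          (p, if p < lower then st.2 - 1 else st.2 + 1))
        ((arr.take a.toNat).sum - (arr.take (a - size).toNat).sum, net)).2
      = (PySem.List.pyRange a (arr.length : Int) 1).foldl
          (fun net i =>
            let s := PySem.List.pyGetD
                (arr.foldl (fun c x => c ++ [PySem.List.pyGetD c (-1) 0 + x]) [(0 : Int)])
                (i + 1) 0
              - PySem.List.pyGetD
                (arr.foldl (fun c x => c ++ [PySem.List.pyGetD c (-1) 0 + x]) [(0 : Int)])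
                (i + 1 - size) 0
            net + (if s ≥ lower then 1 else -1))
          net := by
  intro t
  induction t with
  | zero =>
    intro a net ht ha
    have hna : (arr.length : Int) ≤ a := by omega
    rw [PySem.List.pyRange_one_eq_nil hna]
    simp
  | succ t ih =>
    intro a net ht ha
    have hlt : a < (arr.length : Int) := by omega
    have ha0 : (0 : Int) ≤ a := le_trans hs ha
    have h1 : PySem.List.pyGetD arr a 0
        = (arr.take (a.toNat + 1)).sum - (arr.take a.toNat).sum := by
      rw [PySem.List.pyGetD_eq_getElem arr 0 ha0 hlt,
        List.sum_take_succ arr a.toNat (by omega)]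
      omega
    have h2 : PySem.List.pyGetD arr (a - size) 0
        = (arr.take ((a - size).toNat + 1)).sum - (arr.take (a - size).toNat).sum := by
      rw [PySem.List.pyGetD_eq_getElem arr 0 (by omega) (by omega),
        List.sum_take_succ arr (a - size).toNat (by omega)]
      omega
    have e1 : (a + 1).toNat = a.toNat + 1 := by omega
    have e2 : (a + 1 - size).toNat = (a - size).toNat + 1 := by omega
    have hstep : (arr.take a.toNat).sum - (arr.take (a - size).toNat).sum
          + PySem.List.pyGetD arr a 0 - PySem.List.pyGetD arr (a - size) 0
        = (arr.take (a + 1).toNat).sum - (arr.take (a + 1 - size).toNat).sum := by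
      rw [h1, h2, e1, e2]; ring
    have hc1 : PySem.List.pyGetD
        (arr.foldl (fun c x => c ++ [PySem.List.pyGetD c (-1) 0 + x]) [(0 : Int)]) (a + 1) 0
        = (arr.take (a + 1).toNat).sum := csum_get arr (a + 1) (by omega) (by omega)
    have hc2 : PySem.List.pyGetD
        (arr.foldl (fun c x => c ++ [PySem.List.pyGetD c (-1) 0 + x]) [(0 : Int)]) (a + 1 - size) 0
        = (arr.take (a + 1 - size).toNat).sum := csum_get arr (a + 1 - size) (by omega) (by omega)
    rw [PySem.List.pyRange_one_cons hlt, List.foldl_cons, List.foldl_cons]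
    have hnet : (net + if (arr.take (a + 1).toNat).sum - (arr.take (a + 1 - size).toNat).sum ≥ lower
          then (1 : Int) else -1)
        = (if (arr.take (a + 1).toNat).sum - (arr.take (a + 1 - size).toNat).sum < lower
           then net - 1 else net + 1) := by
      split_ifs <;> omega
    simp only [hstep, hc1, hc2, hnet]
    exact ih (a + 1) _ (by omega) (by omega)

-- ===== VERDICT (by name: the statement is the Claim_ definition above) =====
theorem diet_plan_spec : Claim_equal_diet_plan := by
  intro arr size upper lower hdom hpre
  have hs : (0 : Int) ≤ size := hpre
  show diet_plan arr size upper lower = diet_plan_alt arr size upper lower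
  simp only [diet_plan, diet_plan_alt]
  have hsl : PySem.List.slice arr none (some size) = arr.take size.toNat :=
    PySem.List.slice_to arr hs
  rw [hsl]
  have hcs : PySem.List.pyGetD
      (arr.foldl (fun c x => c ++ [PySem.List.pyGetD c (-1) 0 + x]) [(0 : Int)])
      (min size (arr.length : Int)) 0
      = (arr.take (min size (arr.length : Int)).toNat).sum :=
    csum_get arr _ (by omega) (by omega)
  have htake : arr.take (min size (arr.length : Int)).toNat = arr.take size.toNat := by
    rcases le_total size (arr.length : Int) with h | h
    · rw [min_eq_left h]
    · rw [min_eq_right h, List.take_of_length_le (by omega), List.take_of_length_le (by omega)]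
  rw [hcs, htake]
  have hinit : (if (arr.take size.toNat).sum ≥ lower then (1 : Int) else -1)
      = (if (arr.take size.toNat).sum < lower then (0 : Int) - 1 else (0 : Int) + 1) := by
    split_ifs <;> omega
  rw [hinit]
  have key := loops_eq arr size lower hs ((arr.length : Int) - size).toNat size
    (if (arr.take size.toNat).sum < lower then (0 : Int) - 1 else (0 : Int) + 1) rfl le_rfl
  have hz : (arr.take (size - size).toNat).sum = 0 := by simp [sub_self]
  rw [hz, sub_zero] at key
  exact key
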